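-- pv_equiv track=rewrite | github.com/oneshan/leetcode-python | problems/3057.count-k-subsequences-of-a-string-with-maximum-beauty/solution_1094414810.py | countKSubsequencesWithMaxBeauty
-- ===== SOURCE A (Python) =====
-- from collections import Counter
-- from math import comb
--
-- def countKSubsequencesWithMaxBeauty(s: str, k: int) -> int:
--     MOD = 1_000_000_007
--     counter = Counter(s)
--     if k > len(counter):
--         return 0
--
--     arr = sorted(counter.values(), reverse=True)
--     ans = 1
--     for i in range(k):
--         ans = (ans * arr[i]) % MOD
--
--     last, n = arr[k-1], len(arr)
--     c1 = sum(arr[i] == arr[k-1] for i in range(k))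
--     c2 = sum(arr[i] == arr[k-1] for i in range(n))
--     ans = (ans * comb(c2, c1)) % MOD
--
--     return ans
-- ===== SOURCE B (Python) =====
-- from collections import Counter
-- from math import comb
--
-- def countKSubsequencesWithMaxBeauty(s: str, k: int) -> int:
--     MOD = 1_000_000_007
--     counter = Counter(s)
--     if k > len(counter):
--         return 0
--     arr = sorted(counter.values(), reverse=True)
--     ans = 1
--     remaining = k
--     while arr and remaining > 0:
--         v = arr[0]
--         g = 0
--         while g < len(arr) and arr[g] == v:
--             g += 1
--         take = min(g, remaining)
--         ans = ans * v ** take % MOD * comb(g, take) % MOD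
--         remaining -= take
--         arr = arr[g:]
--     return ans
-- ===== Notes on version B (the rewrite author's own statement) =====
-- stated objective: alternative
-- what changed: Replaces A's top-k product over indices plus a separate comb(c2,c1) boundary correction (computed by two extra counting passes) with a single greedy run-by-run scan of the descending frequency list that multiplies v^take * comb(run, take) per run and stops early when the budget is spent.
-- crash fix: A raises IndexError reading arr[k-1] exactly when k < 1 - #distinct(s) (e.g. s='' with k=0); B's loop never starts there and returns 1, the empty product. — e.g. on countKSubsequencesWithMaxBeauty("", 0): A raises IndexError, B returns 1
import Mathlib
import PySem

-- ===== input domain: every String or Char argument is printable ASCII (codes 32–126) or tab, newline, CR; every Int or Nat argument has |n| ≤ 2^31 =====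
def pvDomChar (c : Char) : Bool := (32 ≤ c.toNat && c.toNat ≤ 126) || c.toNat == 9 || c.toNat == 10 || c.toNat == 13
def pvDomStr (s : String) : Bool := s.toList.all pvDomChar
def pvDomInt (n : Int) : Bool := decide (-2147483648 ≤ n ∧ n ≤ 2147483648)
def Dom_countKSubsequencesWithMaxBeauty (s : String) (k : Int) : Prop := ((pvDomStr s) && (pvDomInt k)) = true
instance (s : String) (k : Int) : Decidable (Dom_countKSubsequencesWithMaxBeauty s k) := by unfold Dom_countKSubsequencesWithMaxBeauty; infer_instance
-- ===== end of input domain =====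

-- B is an alternative algorithm (greedy run-by-run scan of the descending frequency list with an
-- early stop, instead of A's top-k product plus a comb(c2, c1) boundary correction); same cost class.

-- ===== PORT A =====
def countKSubsequencesWithMaxBeauty (s : String) (k : Int) : Int :=
  let M : Int := 1000000007
  let counter := PySem.Dict.counter s.toList
  if k > (counter.size : Int) then 0
  else
    let arr := PySem.List.sorted counter.values (fun x => x) true
    let ans : Int := (PySem.List.pyRange 0 k).foldl
      (fun a i => PySem.Int.mod (a * PySem.List.pyGetD arr i 0) M) 1
    let last := PySem.List.pyGetD arr (k - 1) 0   -- arr[k-1]; Python raises out of range: excluded by Pre_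
    let n := PySem.List.len arr
    let c1 := ((PySem.List.pyRange 0 k).map
      (fun i => if PySem.List.pyGetD arr i 0 = last then (1 : Int) else 0)).sum
    let c2 := ((PySem.List.pyRange 0 n).map
      (fun i => if PySem.List.pyGetD arr i 0 = last then (1 : Int) else 0)).sum
    PySem.Int.mod (ans * ((c2.toNat.choose c1.toNat : Nat) : Int)) M

-- ===== PORT B =====
-- inner while of Source B: length of the leading run of `v`
def pvRunLen (v : Int) : List Int → Nat
  | [] => 0
  | x :: xs => if x = v then pvRunLen v xs + 1 else 0

-- outer while of Source B: consume one run per step, early stop when the budget is spent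
def pvGreedy (M : Int) (arr : List Int) (ans remaining : Int) : Int :=
  match arr with
  | [] => ans
  | v :: t =>
    if 0 < remaining then
      let g := pvRunLen v (v :: t)
      let tk := min (g : Int) remaining
      pvGreedy M ((v :: t).drop g)
        (PySem.Int.mod (PySem.Int.mod (ans * v ^ tk.toNat) M * ((g.choose tk.toNat : Nat) : Int)) M)
        (remaining - tk)
    else ans
termination_by arr.length
decreasing_by simp [pvRunLen]

def countKSubsequencesWithMaxBeauty_alt (s : String) (k : Int) : Int :=
  let M : Int := 1000000007
  let counter := PySem.Dict.counter s.toList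
  if k > (counter.size : Int) then 0
  else
    let arr := PySem.List.sorted counter.values (fun x => x) true
    pvGreedy M arr 1 k

-- ===== PRECONDITION & SPEC =====
-- Pre_ excludes exactly the inputs where A raises IndexError reading arr[k-1]:
-- k < 1 - (number of distinct characters of s), e.g. s = "" with k = 0.
def Pre_countKSubsequencesWithMaxBeauty (s : String) (k : Int) : Prop :=
  1 - ((PySem.Set.ofList s.toList).length : Int) ≤ k
instance (s : String) (k : Int) : Decidable (Pre_countKSubsequencesWithMaxBeauty s k) := by
  unfold Pre_countKSubsequencesWithMaxBeauty; infer_instance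

def pvWitness_countKSubsequencesWithMaxBeauty : String × Int := ("abcabd", 2)

-- A raises IndexError (arr[k-1] with an empty or too-short arr) exactly when k < 1 - #distinct(s);
-- B's greedy loop simply never starts there and returns 1 (the empty product).
def Raises_countKSubsequencesWithMaxBeauty (s : String) (k : Int) : Prop :=
  k < 1 - ((PySem.Set.ofList s.toList).length : Int)
instance (s : String) (k : Int) : Decidable (Raises_countKSubsequencesWithMaxBeauty s k) := by
  unfold Raises_countKSubsequencesWithMaxBeauty; infer_instance
def pvRaiseWitness_countKSubsequencesWithMaxBeauty : String × Int := ("", 0)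
def pvRaiseWitnessOut_countKSubsequencesWithMaxBeauty : Int := 1

def Spec_countKSubsequencesWithMaxBeauty (s : String) (k : Int) (out : Int) : Prop :=
  out = countKSubsequencesWithMaxBeauty_alt s k
instance (s : String) (k : Int) (out : Int) : Decidable (Spec_countKSubsequencesWithMaxBeauty s k out) := by
  unfold Spec_countKSubsequencesWithMaxBeauty; infer_instance

-- ===== CLAIM (what is proved, stated in full; the proofs are below) =====
def Claim_equal_countKSubsequencesWithMaxBeauty : Prop :=
  ∀ (s : String) (k : Int), Dom_countKSubsequencesWithMaxBeauty s k →
    Pre_countKSubsequencesWithMaxBeauty s k →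
    Spec_countKSubsequencesWithMaxBeauty s k (countKSubsequencesWithMaxBeauty s k)

def Claim_raises_countKSubsequencesWithMaxBeauty : Prop :=
  (∀ (s : String) (k : Int), Dom_countKSubsequencesWithMaxBeauty s k →
      Raises_countKSubsequencesWithMaxBeauty s k → ¬ Pre_countKSubsequencesWithMaxBeauty s k) ∧
  (Dom_countKSubsequencesWithMaxBeauty (pvRaiseWitness_countKSubsequencesWithMaxBeauty.1) (pvRaiseWitness_countKSubsequencesWithMaxBeauty.2) ∧
   Raises_countKSubsequencesWithMaxBeauty (pvRaiseWitness_countKSubsequencesWithMaxBeauty.1) (pvRaiseWitness_countKSubsequencesWithMaxBeauty.2) ∧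
   countKSubsequencesWithMaxBeauty_alt (pvRaiseWitness_countKSubsequencesWithMaxBeauty.1) (pvRaiseWitness_countKSubsequencesWithMaxBeauty.2) = pvRaiseWitnessOut_countKSubsequencesWithMaxBeauty)

-- ===== LEMMAS AND PROOFS =====

def pvM : Int := 1000000007
def pvMulMod (acc x : Int) : Int := PySem.Int.mod (acc * x) pvM

theorem pvM_pos : (0 : Int) < pvM := by decide

-- run-length facts
theorem pvRunLen_cons_self (v : Int) (t : List Int) :
    pvRunLen v (v :: t) = pvRunLen v t + 1 := by simp [pvRunLen]

theorem pvRunLen_le_length (v : Int) (xs : List Int) : pvRunLen v xs ≤ xs.length := by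
  induction xs with
  | nil => simp [pvRunLen]
  | cons x t ih =>
    by_cases h : x = v
    · simp [pvRunLen, h]; omega
    · simp [pvRunLen, h]

theorem take_pvRunLen (v : Int) (xs : List Int) :
    xs.take (pvRunLen v xs) = List.replicate (pvRunLen v xs) v := by
  induction xs with
  | nil => simp [pvRunLen]
  | cons x t ih =>
    by_cases h : x = v
    · simp [pvRunLen, h, List.replicate_succ, ih]
    · simp [pvRunLen, h]

theorem drop_pvRunLen_lt (v : Int) (xs : List Int)
    (hp : xs.Pairwise (fun a b => b ≤ a)) (hle : ∀ x ∈ xs, x ≤ v) :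
    ∀ x ∈ xs.drop (pvRunLen v xs), x < v := by
  induction xs with
  | nil => simp
  | cons y t ih =>
    by_cases h : y = v
    · subst h
      rw [pvRunLen_cons_self, List.drop_succ_cons]
      exact ih hp.of_cons (fun x hx => hle x (List.mem_cons_of_mem _ hx))
    · have hy : y < v := lt_of_le_of_ne (hle y (List.mem_cons_self)) h
      simp only [pvRunLen, h, if_false, List.drop_zero]
      intro x hx
      rcases List.mem_cons.mp hx with rfl | hx
      · exact hy
      · exact lt_of_le_of_lt (List.rel_of_pairwise_cons hp hx) hy

theorem pvGreedy_nonpos (M : Int) (xs : List Int) (a r : Int) (hr : ¬ 0 < r) :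
    pvGreedy M xs a r = a := by
  cases xs with
  | nil => simp [pvGreedy]
  | cons v t => simp [pvGreedy, hr]

-- fold of pvMulMod over a replicate block
theorem foldl_pvMulMod_replicate (v a : Int) (g : Nat) (h0 : 0 ≤ a) (h1 : a < pvM) :
    (List.replicate g v).foldl pvMulMod a = PySem.Int.mod (a * v ^ g) pvM := by
  induction g generalizing a with
  | zero =>
    simp [PySem.Int.mod_eq_emod_of_pos pvM_pos, Int.emod_eq_of_lt h0 h1]
  | succ n ih =>
    rw [List.replicate_succ, List.foldl_cons,
      show pvMulMod a v = PySem.Int.mod (a * v) pvM from rfl,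
      ih _ (PySem.Int.mod_nonneg _ pvM_pos) (PySem.Int.mod_lt _ pvM_pos)]
    simp only [PySem.Int.mod_eq_emod_of_pos pvM_pos]
    conv_rhs => rw [pow_succ']
    rw [← mul_assoc]
    conv_lhs => rw [Int.mul_emod (a * v % pvM) (v ^ n) pvM, Int.emod_emod_of_dvd _ dvd_rfl]
    rw [← Int.mul_emod]

-- THE KEY LEMMA: on a descending list, the greedy run scan equals
-- "fold the top-k product, then multiply by comb(count of the boundary value, count among the top k)".
theorem pvKey (N : Nat) : ∀ (arr : List Int), arr.length ≤ N →
    arr.Pairwise (fun a b => b ≤ a) →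
    ∀ (k a : Int), 0 < k → k ≤ arr.length → 0 ≤ a → a < pvM →
    pvGreedy pvM arr a k =
      PySem.Int.mod (((arr.take k.toNat).foldl pvMulMod a) *
        (((arr.count (arr.getD (k.toNat - 1) 0)).choose
          ((arr.take k.toNat).count (arr.getD (k.toNat - 1) 0)) : Nat) : Int)) pvM := by
  induction N with
  | zero =>
    intro arr hN _ k a hk0 hkle _ _
    interval_cases harr : arr.length
    omega
  | succ N ih =>
    intro arr hN hp k a hk0 hkle ha0 ha1
    match arr with
    | [] => simp at hkle; omega
    | v :: t =>
      have hg1 : 1 ≤ pvRunLen v (v :: t) := by rw [pvRunLen_cons_self]; omega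
      have hgle : pvRunLen v (v :: t) ≤ (v :: t).length := pvRunLen_le_length v (v :: t)
      set g := pvRunLen v (v :: t) with hgdef
      set rest := (v :: t).drop g with hrest
      have harr : (v :: t) = List.replicate g v ++ rest := by
        rw [← take_pvRunLen v (v :: t), ← hgdef, hrest, List.take_append_drop]
      have hlt : ∀ x ∈ rest, x < v := by
        refine drop_pvRunLen_lt v (v :: t) hp ?_
        intro x hx
        rcases List.mem_cons.mp hx with rfl | hx
        · exact le_refl x
        · exact List.rel_of_pairwise_cons hp hx
      have hvnotin : v ∉ rest := fun h => lt_irrefl v (hlt v h)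
      have hcv : rest.count v = 0 := List.count_eq_zero.mpr hvnotin
      have hrlen : rest.length = t.length + 1 - g := by
        rw [hrest]; simp
      by_cases hkg : k ≤ (g : Int)
      · -- the budget ends inside this run
        have htk : min (g : Int) k = k := min_eq_right hkg
        have hktn : k.toNat ≤ g := by omega
        rw [pvGreedy, if_pos hk0]
        simp only [← hgdef, htk]
        rw [pvGreedy_nonpos _ _ _ _ (by omega)]
        -- RHS simplification
        have htake : (v :: t).take k.toNat = List.replicate k.toNat v := by
          conv_lhs => rw [harr]
          rw [List.take_append, List.take_replicate, min_eq_left hktn, List.length_replicate,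
            show k.toNat - g = 0 by omega, List.take_zero, List.append_nil]
        have hlast : (v :: t).getD (k.toNat - 1) 0 = v := by
          rw [List.getD_eq_getElem?_getD, harr,
            List.getElem?_append_left (by simpa using by omega : k.toNat - 1 < (List.replicate g v).length),
            List.getElem?_replicate, if_pos (by omega)]
          rfl
        rw [htake, hlast, foldl_pvMulMod_replicate v a k.toNat ha0 ha1]
        have hcnt1 : List.count v (List.replicate k.toNat v) = k.toNat := by
          rw [List.count_replicate, if_pos (by simp)]
        have hcnt2 : List.count v (v :: t) = g := by
          rw [harr, List.count_append, List.count_replicate, if_pos (by simp), hcv]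
          omega
        rw [hcnt1, hcnt2]
      · -- this run is consumed whole; recurse on the remainder
        have hgk : (g : Int) < k := by omega
        have htk : min (g : Int) k = (g : Int) := min_eq_left (by omega)
        rw [pvGreedy, if_pos hk0]
        simp only [← hgdef, htk]
        have hgtn : ((g : Int)).toNat = g := by omega
        rw [hgtn, Nat.choose_self, Nat.cast_one, mul_one]
        have hmm : PySem.Int.mod (PySem.Int.mod (a * v ^ g) pvM) pvM
            = PySem.Int.mod (a * v ^ g) pvM := by
          rw [PySem.Int.mod_eq_emod_of_pos pvM_pos, PySem.Int.mod_eq_emod_of_pos pvM_pos,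
            Int.emod_emod_of_dvd _ dvd_rfl]
        rw [hmm]
        set a' := PySem.Int.mod (a * v ^ g) pvM with ha'
        have ha'0 : 0 ≤ a' := PySem.Int.mod_nonneg _ pvM_pos
        have ha'1 : a' < pvM := PySem.Int.mod_lt _ pvM_pos
        have hlen : (v :: t).length = t.length + 1 := by simp
        have hrec := ih rest (by omega) (hp.sublist (List.drop_sublist _ _))
          (k - (g : Int)) a' (by omega) (by omega) ha'0 ha'1
        rw [← hrest, hrec]
        -- align the two sides
        have hkg' : g ≤ k.toNat := by omega
        have hsub : (k - (g : Int)).toNat = k.toNat - g := by omega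
        have hlast : (v :: t).getD (k.toNat - 1) 0 = rest.getD (k.toNat - 1 - g) 0 := by
          rw [List.getD_eq_getElem?_getD, List.getD_eq_getElem?_getD, harr,
            List.getElem?_append_right (by simpa using by omega : (List.replicate g v).length ≤ k.toNat - 1)]
          simp
        have hlastmem : rest.getD (k.toNat - 1 - g) 0 ∈ rest := by
          have hidx : k.toNat - 1 - g < rest.length := by omega
          rw [List.getD_eq_getElem?_getD, List.getElem?_eq_getElem hidx]
          exact List.getElem_mem hidx
        have hlne : ¬ (v = rest.getD (k.toNat - 1 - g) 0) := by
          intro h; exact absurd (hlt _ hlastmem) (by rw [← h]; exact lt_irrefl v)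
        have htake : (v :: t).take k.toNat
            = List.replicate g v ++ rest.take (k.toNat - g) := by
          conv_lhs => rw [harr]
          rw [List.take_append, List.take_replicate, min_eq_right hkg', List.length_replicate]
        rw [htake, hlast]
        rw [List.foldl_append, foldl_pvMulMod_replicate v a g ha0 ha1, ← ha']
        conv_rhs => rw [harr]
        simp only [List.count_append]
        rw [List.count_replicate, if_neg (by simpa using hlne)]
        simp only [Nat.zero_add, hsub]
        rw [Nat.sub_right_comm]

-- conversion of A's indexed traversals to the take/count form
theorem pvMap_pyGetD_take (xs : List Int) (k : Int) (h0 : 0 ≤ k) (hk : k ≤ xs.length) :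
    (PySem.List.pyRange 0 k).map (fun j => PySem.List.pyGetD xs j 0) = xs.take k.toNat := by
  have h1 : ∀ j ∈ PySem.List.pyRange 0 k,
      PySem.List.pyGetD xs j 0 = PySem.List.pyGetD (xs.take k.toNat) j 0 := by
    intro j hj
    obtain ⟨hj0, hjk⟩ := PySem.List.mem_pyRange_one.mp hj
    rw [PySem.List.pyGetD_eq_getElem xs 0 hj0 (by omega),
        PySem.List.pyGetD_eq_getElem (xs.take k.toNat) 0 hj0 (by simp; omega)]
    simp [List.getElem_take]
  rw [List.map_congr_left h1]
  generalize hm : xs.take k.toNat = m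
  have h2 : (k : Int) = PySem.List.len m := by
    rw [← hm]; simp [pysem]; omega
  rw [h2, PySem.List.map_pyGetD_pyRange_zero]

theorem pvIte_eq_beq (last : Int) :
    (fun x : Int => if x = last then (1 : Int) else 0)
      = fun x : Int => if (x == last) = true then (1 : Int) else 0 := by
  funext x; by_cases h : x = last <;> simp [h]

theorem pvSum_count (l : List Int) (last : Int) :
    ((l.map (fun x : Int => if x = last then (1 : Int) else 0)).sum).toNat = l.count last := by
  rw [pvIte_eq_beq, PySem.List.sum_map_ite_one_zero, List.count_eq_countP]
  simp

-- ===== VERDICT (by name: the statement is the Claim_ definition above) =====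
theorem countKSubsequencesWithMaxBeauty_spec : Claim_equal_countKSubsequencesWithMaxBeauty := by
  intro s k _ hpre
  unfold Pre_countKSubsequencesWithMaxBeauty at hpre
  unfold Spec_countKSubsequencesWithMaxBeauty
  unfold countKSubsequencesWithMaxBeauty countKSubsequencesWithMaxBeauty_alt
  by_cases hks : k > ((PySem.Dict.counter s.toList).size : Int)
  · rw [if_pos hks, if_pos hks]
  · rw [if_neg hks, if_neg hks]
    rw [show (1000000007 : Int) = pvM from rfl]
    set arr := PySem.List.sorted (PySem.Dict.counter s.toList).values (fun x => x) true with harrdef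
    have hlen : arr.length = (PySem.Set.ofList s.toList).length := by
      rw [harrdef, PySem.List.length_sorted]
      have : (PySem.Dict.counter s.toList).values.length
          = (PySem.Dict.counter s.toList).items.length := by
        simp [PySem.Dict.values]
      rw [this, PySem.Dict.items_counter]
      simp
    show PySem.Int.mod
        ((List.foldl (fun a i => PySem.Int.mod (a * PySem.List.pyGetD arr i 0) pvM) 1
            (PySem.List.pyRange 0 k)) *
          ((((List.map (fun i => if PySem.List.pyGetD arr i 0 = PySem.List.pyGetD arr (k - 1) 0 then (1 : Int) else 0)
                (PySem.List.pyRange 0 (PySem.List.len arr))).sum).toNat.choose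
            (((List.map (fun i => if PySem.List.pyGetD arr i 0 = PySem.List.pyGetD arr (k - 1) 0 then (1 : Int) else 0)
                (PySem.List.pyRange 0 k)).sum).toNat) : Nat) : Int)) pvM
      = pvGreedy pvM arr 1 k
    by_cases hk0 : 0 < k
    · -- positive budget: apply the key lemma
      have hk_le : k ≤ (arr.length : Int) := by
        rw [hlen]
        have hsz : ((PySem.Dict.counter s.toList).size : Int)
            = ((PySem.Set.ofList s.toList).length : Int) := by
          have : (PySem.Dict.counter s.toList).size
              = (PySem.Dict.counter s.toList).items.length := by
            simp [PySem.Dict.size]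
          rw [this, PySem.Dict.items_counter]; simp
        omega
      have hp : arr.Pairwise (fun a b => b ≤ a) := by
        have := PySem.List.sorted_pairwise_rev
          (PySem.Dict.counter s.toList).values (fun x : Int => x)
        simpa [harrdef] using this
      have hlast : PySem.List.pyGetD arr (k - 1) 0 = arr.getD (k.toNat - 1) 0 := by
        rw [PySem.List.pyGetD_of_nonneg arr 0 (by omega),
          show (k - 1).toNat = k.toNat - 1 from by omega]
      have hmapA : (PySem.List.pyRange 0 k).map (fun j => PySem.List.pyGetD arr j 0)
          = arr.take k.toNat := pvMap_pyGetD_take arr k hk0.le hk_le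
      have hfold : (PySem.List.pyRange 0 k).foldl
            (fun a i => PySem.Int.mod (a * PySem.List.pyGetD arr i 0) pvM) 1
          = (arr.take k.toNat).foldl pvMulMod 1 := by
        rw [← hmapA, List.foldl_map]
        rfl
      have hcomp : ∀ (l : List Int) (b : Int),
          (fun i => if PySem.List.pyGetD l i 0 = b then (1 : Int) else 0)
            = ((fun x : Int => if x = b then (1 : Int) else 0) ∘ (fun j => PySem.List.pyGetD l j 0)) := by
        intro l b; rfl
      have hc1 : ((PySem.List.pyRange 0 k).map
            (fun i => if PySem.List.pyGetD arr i 0 = PySem.List.pyGetD arr (k - 1) 0 then (1 : Int) else 0)).sum.toNat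
          = (arr.take k.toNat).count (arr.getD (k.toNat - 1) 0) := by
        rw [hcomp, ← List.map_map, hmapA, pvSum_count, hlast]
      have hc2 : ((PySem.List.pyRange 0 (PySem.List.len arr)).map
            (fun i => if PySem.List.pyGetD arr i 0 = PySem.List.pyGetD arr (k - 1) 0 then (1 : Int) else 0)).sum.toNat
          = arr.count (arr.getD (k.toNat - 1) 0) := by
        rw [hcomp, ← List.map_map, PySem.List.map_pyGetD_pyRange_zero, pvSum_count, hlast]
      rw [hfold, hc1, hc2]
      exact (pvKey arr.length arr le_rfl hp k 1 hk0 hk_le (by decide) (by decide)).symm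
    · -- k ≤ 0: both sides are 1
      have hre : PySem.List.pyRange 0 k = [] := by
        rw [List.eq_nil_iff_forall_not_mem]
        intro x hx
        have := PySem.List.mem_pyRange_one.mp hx
        omega
      rw [hre, pvGreedy_nonpos pvM arr 1 k hk0]
      simp [Nat.choose_zero_right]
      decide

@[simp] theorem countKSubsequencesWithMaxBeauty_raises : Claim_raises_countKSubsequencesWithMaxBeauty := by
  unfold Claim_raises_countKSubsequencesWithMaxBeauty
  constructor
  · intro s k _ hr hp
    unfold Raises_countKSubsequencesWithMaxBeauty at hr
    unfold Pre_countKSubsequencesWithMaxBeauty at hp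
    omega
  · refine ⟨by decide, by decide, ?_⟩
    show countKSubsequencesWithMaxBeauty_alt "" 0 = 1
    unfold countKSubsequencesWithMaxBeauty_alt
    norm_num [PySem.Dict.counter, PySem.Dict.size, PySem.Dict.empty, PySem.List.sorted, pvGreedy]
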